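-- pv_equiv track=rewrite | github.com/shark047/UWO | Course/1A/CS1026/LAB/Lab6/Lab6.py | z_first_sort
-- ===== SOURCE A (Python) =====
-- def z_first_sort(words):
--     zresult = []
--     result = []
--
--     for word in words:
--         if word.lower()[0] == "z":
--             zresult.append(word)
--         else:
--             result.append(word)
--
--     zresult.sort()
--     result.sort()
--
--     return zresult + result
-- ===== SOURCE B (Python) =====
-- def z_first_sort(words):
--     # Two-pass stable sort: sort lexicographically, then stable-sort the
--     # z-starting words (key False) to the front.
--     return sorted(sorted(words), key=lambda w: w.lower()[0] != "z")
-- ===== Notes on version B (the rewrite author's own statement) =====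
-- stated objective: idiomatic
-- what changed: The manual partition into two lists followed by two separate sorts is replaced by the idiomatic two-pass stable-sort idiom: sort lexicographically once, then stable-sort by the boolean key "does not start with z".
import Mathlib
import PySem

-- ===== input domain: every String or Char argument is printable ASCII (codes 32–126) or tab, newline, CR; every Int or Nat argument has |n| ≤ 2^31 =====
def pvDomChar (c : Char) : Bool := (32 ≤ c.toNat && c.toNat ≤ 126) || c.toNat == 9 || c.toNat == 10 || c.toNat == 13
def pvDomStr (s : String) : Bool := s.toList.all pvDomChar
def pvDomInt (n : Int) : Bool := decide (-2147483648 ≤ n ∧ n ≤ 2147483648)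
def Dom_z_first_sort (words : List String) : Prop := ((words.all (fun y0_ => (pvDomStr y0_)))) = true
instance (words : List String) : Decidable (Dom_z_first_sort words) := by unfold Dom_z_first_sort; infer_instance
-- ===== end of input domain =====

-- B replaces the partition-then-two-sorts with the idiomatic two-pass stable sort
-- (sort lexicographically, then stable-sort by the boolean "does not start with z").

-- ===== PORT A =====
-- word.lower()[0] == "z": the 1-character string compare is exact as an Option Char compare.
def z_first_sort (words : List String) : List String :=
  let pr := words.foldl
    (fun (acc : List String × List String) word =>
      if PySem.Str.pyGet? (PySem.Str.lower word) 0 == some 'z'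
      then (acc.1 ++ [word], acc.2)
      else (acc.1, acc.2 ++ [word]))
    ([], [])
  PySem.List.sorted pr.1 (fun w => w) false ++ PySem.List.sorted pr.2 (fun w => w) false

-- ===== PORT B =====
-- the key  lambda w: w.lower()[0] != "z"  (Bool; False sorts before True)
def zAltKey (w : String) : Bool := PySem.Str.pyGet? (PySem.Str.lower w) 0 != some 'z'

def z_first_sort_alt (words : List String) : List String :=
  PySem.List.sorted (PySem.List.sorted words (fun w => w) false) zAltKey false

-- ===== PRECONDITION & SPEC =====
-- Pre_ excludes lists containing an empty string, on which both Pythons raise IndexError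
-- (word.lower()[0]).
def Pre_z_first_sort (words : List String) : Prop := ∀ w ∈ words, w ≠ ""
instance (words : List String) : Decidable (Pre_z_first_sort words) := by unfold Pre_z_first_sort; infer_instance

def pvWitness_z_first_sort : List String := ["zebra", "Apple", "Zoo", "banana"]

def Spec_z_first_sort (words : List String) (out : List String) : Prop := out = z_first_sort_alt words
instance (words : List String) (out : List String) : Decidable (Spec_z_first_sort words out) := by unfold Spec_z_first_sort; infer_instance

-- ===== CLAIM (what is proved, stated in full; the proofs are below) =====
def Claim_equal_z_first_sort : Prop := ∀ (words : List String), Dom_z_first_sort words → Pre_z_first_sort words → Spec_z_first_sort words (z_first_sort words)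

-- ===== LEMMAS AND PROOFS =====

-- The total order both results are pairwise-sorted by: z-key first, then the word itself.
def zRel (a b : String) : Prop :=
  (zAltKey a = false ∧ zAltKey b = true) ∨ (zAltKey a = zAltKey b ∧ a ≤ b)

theorem zRel_antisymm : ∀ a b : String, zRel a b → zRel b a → a = b := by
  intro a b hab hba
  rcases hab with ⟨h1, h2⟩ | ⟨he, hle⟩
  · rcases hba with ⟨h1', h2'⟩ | ⟨he', _⟩ <;> simp_all
  · rcases hba with ⟨h1', h2'⟩ | ⟨_, hle'⟩
    · simp_all
    · exact le_antisymm hle hle'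

-- the comparator PySem's stable insertion sort uses for a Bool key
theorem bool_lt_comparator :
    (fun a b : String => decide (zAltKey a < zAltKey b))
      = (fun a b => !zAltKey a && zAltKey b) := by
  funext a b
  cases h1 : zAltKey a <;> cases h2 : zAltKey b <;> decide

theorem insertBy_cons (before : String → String → Bool) (x y : String) (ys : List String) :
    PySem.List.insertBy before x (y :: ys)
      = if before x y then x :: y :: ys else y :: PySem.List.insertBy before x ys := by
  rw [PySem.List.insertBy]

theorem mem_insertBy {α : Type} (before : α → α → Bool) (x a : α) (l : List α) :
    a ∈ PySem.List.insertBy before x l ↔ a = x ∨ a ∈ l := by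
  induction l with
  | nil => rw [PySem.List.insertBy]; simp
  | cons y ys ih =>
    rw [PySem.List.insertBy]
    by_cases h : before x y = true
    · simp [h]
    · simp [h, ih]; tauto

theorem pairwise_insertBy (x : String) (l : List String)
    (hl : l.Pairwise zRel) (hx : ∀ a ∈ l, a ≤ x) :
    (PySem.List.insertBy (fun a b => !zAltKey a && zAltKey b) x l).Pairwise zRel := by
  induction l with
  | nil => rw [PySem.List.insertBy]; simp
  | cons y ys ih =>
    rcases List.pairwise_cons.mp hl with ⟨hy, hys⟩
    rw [insertBy_cons]
    by_cases h : (!zAltKey x && zAltKey y) = true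
    · rw [if_pos h]
      have h' := h
      simp only [Bool.and_eq_true, Bool.not_eq_true'] at h'
      obtain ⟨hxf, hyt⟩ := h'
      refine List.pairwise_cons.mpr ⟨?_, hl⟩
      intro b hb
      rcases List.mem_cons.mp hb with hb | hb
      · exact Or.inl ⟨hxf, hb ▸ hyt⟩
      · rcases hy b hb with ⟨_, hbt⟩ | ⟨he, _⟩
        · exact Or.inl ⟨hxf, hbt⟩
        · exact Or.inl ⟨hxf, he ▸ hyt⟩
    · rw [if_neg h]
      refine List.pairwise_cons.mpr ⟨?_, ih hys (fun a ha => hx a (List.mem_cons_of_mem _ ha))⟩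
      intro b hb
      rcases (mem_insertBy _ _ _ _).mp hb with hb | hb
      · subst hb
        by_cases he : zAltKey y = zAltKey b
        · exact Or.inr ⟨he, hx y List.mem_cons_self⟩
        · refine Or.inl ?_
          cases h1 : zAltKey y <;> cases h2 : zAltKey b
          · exact absurd (h1.trans h2.symm) he
          · exact ⟨rfl, rfl⟩
          · simp at h; exact absurd (h h2) (by simp [h1])
          · exact absurd (h1.trans h2.symm) he
      · exact hy b hb

-- stability: sorting an already ≤-sorted list by the boolean key yields a zRel-sorted list
theorem pairwise_foldl_insert (xs acc : List String)
    (hacc : acc.Pairwise zRel)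
    (hcross : ∀ a ∈ acc, ∀ b ∈ xs, a ≤ b)
    (hxs : xs.Pairwise (· ≤ ·)) :
    (xs.foldl (fun acc x =>
        PySem.List.insertBy (fun a b => !zAltKey a && zAltKey b) x acc) acc).Pairwise zRel := by
  induction xs generalizing acc with
  | nil => simpa using hacc
  | cons x xs ih =>
    rcases List.pairwise_cons.mp hxs with ⟨hx, hxs'⟩
    simp only [List.foldl_cons]
    apply ih _ (pairwise_insertBy x acc hacc (fun a ha => hcross a ha x List.mem_cons_self)) _ hxs'
    intro a ha b hb
    rcases (mem_insertBy _ _ _ _).mp ha with h | h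
    · exact h ▸ hx b hb
    · exact hcross a h b (List.mem_cons_of_mem _ hb)

theorem sorted_alt_eq (xs : List String) :
    PySem.List.sorted xs zAltKey false
      = xs.foldl (fun acc x =>
          PySem.List.insertBy (fun a b => !zAltKey a && zAltKey b) x acc) [] := by
  rw [show PySem.List.sorted xs zAltKey false
        = xs.foldl (fun acc x =>
            PySem.List.insertBy (fun a b => decide (zAltKey a < zAltKey b)) x acc) [] from rfl,
      bool_lt_comparator]

theorem alt_pairwise (words : List String) : (z_first_sort_alt words).Pairwise zRel := by
  unfold z_first_sort_alt
  rw [sorted_alt_eq]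
  exact pairwise_foldl_insert _ [] (by simp) (by simp)
    (PySem.List.sorted_pairwise words (fun w => w))

def zIsZ (w : String) : Bool := PySem.Str.pyGet? (PySem.Str.lower w) 0 == some 'z'

theorem key_eq (w : String) : zAltKey w = !zIsZ w := by
  simp [zAltKey, zIsZ, bne]

theorem a_foldl_eq (words : List String) (acc : List String × List String) :
    words.foldl
      (fun (acc : List String × List String) word =>
        if PySem.Str.pyGet? (PySem.Str.lower word) 0 == some 'z'
        then (acc.1 ++ [word], acc.2)
        else (acc.1, acc.2 ++ [word])) acc
    = (acc.1 ++ words.filter zIsZ, acc.2 ++ words.filter (fun w => !zIsZ w)) := by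
  induction words generalizing acc with
  | nil => simp
  | cons w ws ih =>
    by_cases h : zIsZ w = true <;> simp_all [zIsZ]

theorem a_pairwise (words : List String) : (z_first_sort words).Pairwise zRel := by
  unfold z_first_sort
  rw [a_foldl_eq]
  simp only [List.nil_append]
  apply List.pairwise_append.mpr
  refine ⟨?_, ?_, ?_⟩
  · refine List.Pairwise.imp_of_mem (fun {a b} ha hb hle => ?_)
      (PySem.List.sorted_pairwise _ (fun w => w))
    have h1 : zIsZ a = true := List.of_mem_filter ((PySem.List.mem_sorted _ _ _ _).mp ha)
    have h2 : zIsZ b = true := List.of_mem_filter ((PySem.List.mem_sorted _ _ _ _).mp hb)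
    exact Or.inr ⟨by simp [key_eq, h1, h2], hle⟩
  · refine List.Pairwise.imp_of_mem (fun {a b} ha hb hle => ?_)
      (PySem.List.sorted_pairwise _ (fun w => w))
    have h1 : zIsZ a = false := by
      simpa using List.of_mem_filter ((PySem.List.mem_sorted _ _ _ _).mp ha)
    have h2 : zIsZ b = false := by
      simpa using List.of_mem_filter ((PySem.List.mem_sorted _ _ _ _).mp hb)
    exact Or.inr ⟨by simp [key_eq, h1, h2], hle⟩
  · intro a ha b hb
    have h1 : zIsZ a = true := List.of_mem_filter ((PySem.List.mem_sorted _ _ _ _).mp ha)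
    have h2 : zIsZ b = false := by
      simpa using List.of_mem_filter ((PySem.List.mem_sorted _ _ _ _).mp hb)
    exact Or.inl ⟨by simp [key_eq, h1], by simp [key_eq, h2]⟩

theorem a_perm (words : List String) : (z_first_sort words).Perm words := by
  unfold z_first_sort
  rw [a_foldl_eq]
  simp only [List.nil_append]
  exact ((PySem.List.sorted_perm _ _ _).append (PySem.List.sorted_perm _ _ _)).trans
    (List.filter_append_perm _ _)

theorem alt_perm (words : List String) : (z_first_sort_alt words).Perm words :=
  (PySem.List.sorted_perm _ _ _).trans (PySem.List.sorted_perm _ _ _)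

-- ===== VERDICT (by name: the statement is the Claim_ definition above) =====
theorem z_first_sort_spec : Claim_equal_z_first_sort := by
  intro words _ _
  unfold Spec_z_first_sort
  exact List.Perm.eq_of_pairwise (fun a b _ _ => zRel_antisymm a b)
    (a_pairwise words) (alt_pairwise words)
    ((a_perm words).trans (alt_perm words).symm)
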